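-- pv_equiv track=rewrite | github.com/kamilGie/ASRT-WDI | Zestaw_2:_Tablice_jednowymiarowe/71/rozwiazanie71.py | Zadanie_71
-- ===== SOURCE A (Python) =====
-- def Zadanie_71(sequence):
--     if len(sequence) <= 2:
--         return (len(sequence), len(sequence))
--
--     r = sequence[1] - sequence[0]
--     max_leng_incr = 1
--     max_leng_decr = 1
--     leng = 2
--     for i in range(2, len(sequence)):
--         if sequence[i] == sequence[i - 1] + r:
--             leng += 1
--         else:
--             if r > 0:
--                 max_leng_incr = max(max_leng_incr, leng)
--             else:
--                 max_leng_decr = max(max_leng_decr, leng)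
--             leng = 2
--             r = sequence[i] - sequence[i - 1]
--
--         if r > 0:
--             max_leng_incr = max(max_leng_incr, leng)
--         else:
--             max_leng_decr = max(max_leng_decr, leng)
--
--     return max_leng_incr, max_leng_decr
-- ===== SOURCE B (Python) =====
-- def Zadanie_71(sequence):
--     n = len(sequence)
--     if n <= 2:
--         return (n, n)
--     diffs = [b - a for a, b in zip(sequence, sequence[1:])]
--     mi = md = 1
--     rest = diffs[::-1]  # consume the diffs front-to-back via O(1) pops
--     while rest:
--         d = rest.pop()
--         g = 1
--         while rest and rest[-1] == d:
--             rest.pop()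
--             g += 1
--         if d > 0:
--             mi = max(mi, g + 1)
--         else:
--             md = max(md, g + 1)
--     return (mi, md)
-- ===== Notes on version B (the rewrite author's own statement) =====
-- stated objective: alternative
-- what changed: A's single stateful scan carrying the current difference r, a running length and in-loop max updates on every iteration is replaced by a two-phase decomposition: first build the list of consecutive differences, then consume it maximal run by maximal run, updating the appropriate maximum once per run.
import Mathlib
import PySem

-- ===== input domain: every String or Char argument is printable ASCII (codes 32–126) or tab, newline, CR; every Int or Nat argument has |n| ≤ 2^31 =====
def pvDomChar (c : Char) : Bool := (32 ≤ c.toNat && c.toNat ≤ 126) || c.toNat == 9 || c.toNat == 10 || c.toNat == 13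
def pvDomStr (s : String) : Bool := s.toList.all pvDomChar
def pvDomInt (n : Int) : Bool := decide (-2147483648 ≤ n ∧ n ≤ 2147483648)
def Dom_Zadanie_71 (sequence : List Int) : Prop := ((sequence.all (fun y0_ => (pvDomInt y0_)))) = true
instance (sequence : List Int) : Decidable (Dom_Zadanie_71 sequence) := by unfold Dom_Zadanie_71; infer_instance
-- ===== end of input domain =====

-- B replaces A's single stateful scan (current difference r, running length, in-loop max updates)
-- by a two-phase decomposition: build the list of consecutive differences, then consume it maximal
-- run by maximal run (objective: alternative decomposition, same O(n) cost).

-- ===== PORT A =====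
-- A's loop body; the indices produced by range(2, len) are always in bounds, so pyGetD with
-- default 0 is exact here.
def pvAStep (sequence : List Int) (st : Int × Int × Int × Int) (i : Int) : Int × Int × Int × Int :=
  let (r, mi, md, leng) := st
  let (r, mi, md, leng) :=
    if PySem.List.pyGetD sequence i 0 = PySem.List.pyGetD sequence (i - 1) 0 + r then
      (r, mi, md, leng + 1)
    else
      (PySem.List.pyGetD sequence i 0 - PySem.List.pyGetD sequence (i - 1) 0,
       if 0 < r then max mi leng else mi,
       if 0 < r then md else max md leng,
       2)
  if 0 < r then (r, max mi leng, md, leng) else (r, mi, max md leng, leng)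

def Zadanie_71 (sequence : List Int) : Int × Int :=
  if sequence.length ≤ 2 then ((sequence.length : Int), (sequence.length : Int))
  else
    let st := (PySem.List.pyRange 2 (sequence.length : Int) 1).foldl (pvAStep sequence)
      (PySem.List.pyGetD sequence 1 0 - PySem.List.pyGetD sequence 0 0, 1, 1, 2)
    (st.2.1, st.2.2.1)

-- ===== PORT B =====
-- Source B consumes the diffs front-to-back by popping a reversed stack; the Lean list below IS that
-- remaining front-to-back sequence, so each pop is taking the head.
-- inner while of Source B: count the leading diffs equal to d (g starts at 1), return (g, rest)
def pvAltInner (d : Int) : List Int → Int × List Int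
  | [] => (1, [])
  | x :: xs => if x = d then let p := pvAltInner d xs; (p.1 + 1, p.2) else (1, x :: xs)

-- termination measure for the outer while (cited by pvAltOuter's decreasing_by)
theorem pvAltInner_len_le (d : Int) (l : List Int) : (pvAltInner d l).2.length ≤ l.length := by
  induction l with
  | nil => simp [pvAltInner]
  | cons x xs ih => by_cases h : x = d <;> simp [pvAltInner, h] <;> omega

-- outer while of Source B over the remaining diffs, carrying the two maxima
def pvAltOuter : List Int → Int → Int → Int × Int
  | [], mi, md => (mi, md)
  | d :: rest, mi, md =>
    let p := pvAltInner d rest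
    pvAltOuter p.2 (if 0 < d then max mi (p.1 + 1) else mi)
                   (if 0 < d then md else max md (p.1 + 1))
termination_by l _ _ => l.length
decreasing_by exact Nat.lt_succ_of_le (pvAltInner_len_le d rest)

def Zadanie_71_alt (sequence : List Int) : Int × Int :=
  if sequence.length ≤ 2 then ((sequence.length : Int), (sequence.length : Int))
  else
    let diffs := (sequence.zip (PySem.List.slice sequence (some 1) none)).map (fun p => p.2 - p.1)
    pvAltOuter diffs 1 1

-- ===== PRECONDITION & SPEC =====
def Spec_Zadanie_71 (sequence : List Int) (out : Int × Int) : Prop := out = Zadanie_71_alt sequence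
instance (sequence : List Int) (out : Int × Int) : Decidable (Spec_Zadanie_71 sequence out) := by unfold Spec_Zadanie_71; infer_instance

-- ===== CLAIM (what is proved, stated in full; the proofs are below) =====
def Claim_equal_Zadanie_71 : Prop := ∀ (sequence : List Int), Dom_Zadanie_71 sequence → Spec_Zadanie_71 sequence (Zadanie_71 sequence)

-- ===== LEMMAS AND PROOFS =====

-- A's loop body expressed directly on the consecutive difference d = s[i] - s[i-1]
def pvStepD (st : Int × Int × Int × Int) (d : Int) : Int × Int × Int × Int :=
  let (r, mi, md, leng) := st
  let (r, mi, md, leng) :=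
    if d = r then (r, mi, md, leng + 1)
    else (d, if 0 < r then max mi leng else mi, if 0 < r then md else max md leng, 2)
  if 0 < r then (r, max mi leng, md, leng) else (r, mi, max md leng, leng)

theorem pvAStep_eq_stepD (s : List Int) (i : Nat) (h1 : 1 ≤ i) (hi : i < s.length)
    (st : Int × Int × Int × Int) :
    pvAStep s st (i : Int) = pvStepD st (s[i] - s[i - 1]'(by omega)) := by
  obtain ⟨r, mi, md, leng⟩ := st
  have e1 : PySem.List.pyGetD s (i : Int) 0 = s[i] := by
    rw [PySem.List.pyGetD_natCast]; exact List.getD_eq_getElem _ _ hi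
  have e2 : PySem.List.pyGetD s ((i : Int) - 1) 0 = s[i-1]'(by omega) := by
    have : (i : Int) - 1 = ((i - 1 : Nat) : Int) := by omega
    rw [this, PySem.List.pyGetD_natCast]; exact List.getD_eq_getElem _ _ (by omega)
  have hc : (s[i] = s[i - 1]'(by omega) + r) = (s[i] - s[i - 1]'(by omega) = r) := by
    apply propext; constructor <;> intro <;> omega
  simp only [pvAStep, pvStepD, e1, e2, hc]

-- bridge: A's index fold over range(k+1, len) is a fold of pvStepD over the diffs from position k
theorem pvBridge (s : List Int) (m : Nat) : ∀ (k : Nat) (init : Int × Int × Int × Int),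
    s.length ≤ k + 1 + m → 1 ≤ k →
    (PySem.List.pyRange ((k : Int) + 1) (s.length : Int) 1).foldl (pvAStep s) init
      = (List.zipWith (fun a b => b - a) (s.drop k) (s.drop (k + 1))).foldl pvStepD init := by
  induction m with
  | zero =>
    intro k init hle hk
    rw [PySem.List.pyRange_one_eq_nil (by omega)]
    have : s.drop (k + 1) = [] := List.drop_eq_nil_of_le (by omega)
    rw [this, List.zipWith_nil_right]; rfl
  | succ m ih =>
    intro k init hle hk
    by_cases h : k + 1 < s.length
    · rw [PySem.List.pyRange_one_cons (by omega)]
      have hd1 : s.drop k = s[k] :: s.drop (k + 1) := (List.getElem_cons_drop (by omega)).symm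
      have hd2 : s.drop (k + 1) = s[k+1] :: s.drop (k + 2) := (List.getElem_cons_drop (by omega)).symm
      rw [List.foldl_cons]
      rw [show ((k : Int) + 1) = ((k + 1 : Nat) : Int) by push_cast; ring]
      rw [pvAStep_eq_stepD s (k+1) (by omega) (by omega)]
      simp only [Nat.add_sub_cancel]
      rw [show ((k + 1 : Nat) : Int) + 1 = ((k : Int) + 1) + 1 by push_cast; ring]
      have := ih (k + 1) (pvStepD init (s[k+1] - s[k])) (by omega) (by omega)
      rw [show (((k+1 : Nat) : Int) + 1) = ((k : Int) + 1) + 1 by push_cast; ring] at this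
      rw [this]
      conv_rhs => rw [hd1, hd2]
      simp [List.zipWith]
    · rw [PySem.List.pyRange_one_eq_nil (by omega)]
      have : s.drop (k + 1) = [] := List.drop_eq_nil_of_le (by omega)
      rw [this, List.zipWith_nil_right]; rfl

theorem pvAltInner_fst_pos (d : Int) (l : List Int) : 1 ≤ (pvAltInner d l).1 := by
  induction l with
  | nil => simp [pvAltInner]
  | cons x xs ih => by_cases h : x = d <;> simp [pvAltInner, h] <;> omega

-- main invariant: provided the maxima already cover the current partial run, A's remaining fold
-- equals B's run-by-run consumption of the remaining diffs
theorem pvMain (rest : List Int) : ∀ (r mi md leng : Int),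
    (if 0 < r then leng ≤ mi else leng ≤ md) →
    (let st := rest.foldl pvStepD (r, mi, md, leng)
     (st.2.1, st.2.2.1))
      = (let p := pvAltInner r rest
         pvAltOuter p.2 (if 0 < r then max mi (leng + p.1 - 1) else mi)
                        (if 0 < r then md else max md (leng + p.1 - 1))) := by
  induction rest with
  | nil =>
    intro r mi md leng hinv
    simp only [List.foldl_nil, pvAltInner, pvAltOuter]
    by_cases hr : 0 < r
    · simp only [if_pos hr] at hinv ⊢
      rw [show leng + 1 - 1 = leng by ring, max_eq_left hinv]
    · simp only [if_neg hr] at hinv ⊢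
      rw [show leng + 1 - 1 = leng by ring, max_eq_left hinv]
  | cons x xs ih =>
    intro r mi md leng hinv
    by_cases hx : x = r
    · -- the run continues
      subst hx
      by_cases hr : 0 < x
      · have step : pvStepD (x, mi, md, leng) x = (x, max mi (leng+1), md, leng+1) := by
          simp [pvStepD, hr]
        rw [List.foldl_cons, step]
        rw [ih x (max mi (leng+1)) md (leng+1) (by simp [hr])]
        have hp := pvAltInner_fst_pos x xs
        simp only [pvAltInner, if_pos hr]
        have : max (max mi (leng + 1)) (leng + 1 + (pvAltInner x xs).1 - 1)
             = max mi (leng + (pvAltInner x xs).1 + 1 - 1) := by omega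
        rw [this]; simp; ring_nf
      · have step : pvStepD (x, mi, md, leng) x = (x, mi, max md (leng+1), leng+1) := by
          simp [pvStepD, hr]
        rw [List.foldl_cons, step]
        rw [ih x mi (max md (leng+1)) (leng+1) (by simp [hr])]
        have hp := pvAltInner_fst_pos x xs
        simp only [pvAltInner, if_neg hr]
        have : max (max md (leng + 1)) (leng + 1 + (pvAltInner x xs).1 - 1)
             = max md (leng + (pvAltInner x xs).1 + 1 - 1) := by omega
        rw [this]; simp; ring_nf
    · -- a new run starts at x
      have hmi : (if 0 < r then max mi leng else mi) = mi := by
        by_cases hr : 0 < r <;> simp_all <;> omega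
      have hmd : (if 0 < r then md else max md leng) = md := by
        by_cases hr : 0 < r <;> simp_all <;> omega
      have step : pvStepD (r, mi, md, leng) x
          = (x, (if 0 < x then max mi 2 else mi), (if 0 < x then md else max md 2), 2) := by
        simp only [pvStepD, if_neg hx, hmi, hmd]
        by_cases hx0 : 0 < x <;> simp [hx0]
      rw [List.foldl_cons, step]
      rw [ih x _ _ 2 (by by_cases hx0 : 0 < x <;> simp [hx0] <;> omega)]
      -- right-hand side: pvAltInner r (x::xs) = (1, x::xs), maxima unchanged
      simp only [pvAltInner, if_neg hx]
      rw [show leng + 1 - 1 = leng by ring, hmi, hmd]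
      rw [pvAltOuter]
      have hp := pvAltInner_fst_pos x xs
      by_cases hx0 : 0 < x
      · simp only [if_pos hx0]
        congr 1 <;> omega
      · simp only [if_neg hx0]
        congr 1 <;> omega

-- the very first iteration makes A's start state (r,1,1,2) behave as if the maxima already
-- covered the initial run of length 2
theorem pvFirstStep (r x : Int) :
    pvStepD (r, 1, 1, 2) x
      = pvStepD (r, (if 0 < r then 2 else 1), (if 0 < r then 1 else 2), 2) x := by
  simp only [pvStepD]
  split_ifs <;> simp

-- ===== VERDICT (by name: the statement is the Claim_ definition above) =====
theorem Zadanie_71_spec : Claim_equal_Zadanie_71 := by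
  unfold Claim_equal_Zadanie_71
  intro s _
  unfold Spec_Zadanie_71
  by_cases hle : s.length ≤ 2
  · simp [Zadanie_71, Zadanie_71_alt, hle]
  · obtain ⟨x0, x1, x2, t, rfl⟩ : ∃ a b c u, s = a :: b :: c :: u := by
      match s, hle with
      | a :: b :: c :: u, _ => exact ⟨a, b, c, u, rfl⟩
      | [], h => simp at h
      | [a], h => simp at h
      | [a, b], h => simp at h
    set s := x0 :: x1 :: x2 :: t with hs
    have hlen : 3 ≤ s.length := by simp [hs]
    -- A side: bridge to a pvStepD fold over the diffs tail
    simp only [Zadanie_71, Zadanie_71_alt, if_neg hle]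
    have e1 : PySem.List.pyGetD s 1 0 = x1 := by
      rw [show (1 : Int) = ((1 : Nat) : Int) by norm_num, PySem.List.pyGetD_natCast]; simp [hs]
    have e0 : PySem.List.pyGetD s 0 0 = x0 := by
      rw [show (0 : Int) = ((0 : Nat) : Int) by norm_num, PySem.List.pyGetD_natCast]; simp [hs]
    rw [e1, e0]
    rw [show PySem.List.pyRange 2 (s.length : Int) 1
          = PySem.List.pyRange (((1 : Nat) : Int) + 1) (s.length : Int) 1 by norm_num]
    rw [pvBridge s s.length 1 _ (by omega) (le_refl 1)]
    -- B side: diffs = zipWith (fun a b => b - a) s (s.drop 1)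
    have hslice : PySem.List.slice s (some 1) none = s.drop 1 := by
      rw [show (1 : Int) = ((1 : Nat) : Int) by norm_num, PySem.List.slice_from_natCast]
    rw [hslice]
    have hzm : (s.zip (s.drop 1)).map (fun p => p.2 - p.1)
        = List.zipWith (fun a b => b - a) s (s.drop 1) := by
      rw [List.zip_eq_zipWith, List.map_zipWith]
    rw [hzm]
    -- expose the head of the diffs
    have hdrop1 : s.drop 1 = x1 :: x2 :: t := by simp [hs]
    have hdrop2 : s.drop 2 = x2 :: t := by simp [hs]
    have hdiffs : List.zipWith (fun a b => b - a) s (s.drop 1)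
        = (x1 - x0) :: List.zipWith (fun a b => b - a) (s.drop 1) (s.drop 2) := by
      rw [hdrop1, hdrop2]; simp [hs, List.zipWith]
    rw [hdiffs]
    set T := List.zipWith (fun a b => b - a) (s.drop 1) (s.drop 2) with hT
    -- A side: adjust the first step, then apply the invariant
    have hTne : T ≠ [] := by
      rw [hT, hdrop1, hdrop2]; simp [List.zipWith]
    match hT2 : T, hTne with
    | y :: ys, _ =>
    rw [List.foldl_cons, pvFirstStep, ← List.foldl_cons]
    have hinv : (if 0 < x1 - x0 then (2:Int) ≤ (if 0 < x1 - x0 then (2:Int) else 1)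
                 else (2:Int) ≤ (if 0 < x1 - x0 then (1:Int) else 2)) := by
      split_ifs <;> norm_num
    rw [pvMain (y :: ys) (x1 - x0) _ _ 2 hinv]
    -- both sides are now pvAltOuter on the rest of the first run
    rw [pvAltOuter]
    have hp := pvAltInner_fst_pos (x1 - x0) (y :: ys)
    by_cases h0 : 0 < x1 - x0
    · simp only [if_pos h0]
      congr 1 <;> omega
    · simp only [if_neg h0]
      congr 1 <;> omega
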